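-- pv_equiv track=rewrite | github.com/Braisrg5/ProjectEuler | solutions/problem_053.py | combinatorics_greater_v2
-- ===== SOURCE A (Python) =====
-- from math import comb
--
-- def combinatorics_greater_v2(N, bound):
--     '''Finds the values of nCr for 1 <= n <= N that are greater than bound.'''
--     # Total count of values for all n
--     total_count = 0
--     for n in range(1, N+1):
--         # Values for this particular n
--         n_count = 0
--         # We take the biggest value in nCr
--         current = comb(n, n//2)
--         # If the biggest value isn't bigger than bound, we can skip this n
--         if current > bound:
--             n_count += 1
--             # Go backwards from biggest to smallest (1*)
--             for r in range(n//2, 0, -1):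
--                 # Relationship between nCr and nC(r-1) (2*)
--                 current = current*r//(n-r+1)
--                 # No more values bigger than bound
--                 if current <= bound:
--                     break
--                 n_count += 1
--             # Multiply by 2 because of symmetry
--             n_count *= 2
--             # Compensate for even numbers
--             if n % 2 == 0:
--                 n_count -= 1
--         total_count += n_count
--     return total_count
-- ===== SOURCE B (Python) =====
-- from math import comb
--
-- def combinatorics_greater_v2(N, bound):
--     '''Finds the values of nCr for 1 <= n <= N that are greater than bound.'''
--     total = 0
--     for n in range(1, N + 1):
--         if comb(n, n // 2) <= bound:
--             continue
--         # Binary-search the least r in [0, n//2] with comb(n, r) > bound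
--         # (comb(n, .) is nondecreasing on [0, n//2]); by symmetry the
--         # values > bound are exactly r in [r_min, n - r_min].
--         lo, hi = 0, n // 2
--         while lo < hi:
--             mid = (lo + hi) // 2
--             if comb(n, mid) > bound:
--                 hi = mid
--             else:
--                 lo = mid + 1
--         total += n + 1 - 2 * lo
--     return total
-- ===== Notes on version B (the rewrite author's own statement) =====
-- stated objective: faster
-- what changed: Per row, instead of walking r down from n//2 with a big-int multiply/divide update until the value drops to bound, B binary-searches the least r with comb(n,r) > bound on the monotone left half and gets the row count in closed form as n+1-2*r_min.
import Mathlib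
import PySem

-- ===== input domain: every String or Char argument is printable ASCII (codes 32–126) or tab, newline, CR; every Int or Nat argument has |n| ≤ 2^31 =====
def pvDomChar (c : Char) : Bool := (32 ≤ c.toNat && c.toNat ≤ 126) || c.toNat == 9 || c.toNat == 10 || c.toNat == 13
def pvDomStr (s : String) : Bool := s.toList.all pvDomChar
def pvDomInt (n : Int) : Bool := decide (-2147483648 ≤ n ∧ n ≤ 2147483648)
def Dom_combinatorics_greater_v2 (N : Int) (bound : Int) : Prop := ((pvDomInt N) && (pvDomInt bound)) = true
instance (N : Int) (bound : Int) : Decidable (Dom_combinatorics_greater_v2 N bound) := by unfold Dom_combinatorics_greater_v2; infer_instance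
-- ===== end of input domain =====

-- B replaces A's per-row downward multiply/divide scan by a binary search for the least r with
-- comb(n,r) > bound plus the closed-form row count n+1-2*r_min (objective: faster, constant-factor).

-- ===== PORT A =====
-- math.comb(n, k); exact for 0 ≤ k ≤ n, the only way either program calls it (n ≥ 1, k ∈ [0, n//2])
def pyComb (n k : Int) : Int := ((n.toNat.choose k.toNat : Nat) : Int)

-- the inner `for r in range(n//2, 0, -1)` with its break, as the obvious countdown recursion on r;
-- state (current, n_count)
def combInnerA (n bound : Int) : Int → Int → Nat → Int × Int
  | cur, cnt, 0 => (cur, cnt)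
  | cur, cnt, rr + 1 =>
      let r : Int := ((rr + 1 : Nat) : Int)
      let cur' := PySem.Int.floordiv (cur * r) (n - r + 1)
      if cur' ≤ bound then (cur', cnt)
      else combInnerA n bound cur' (cnt + 1) rr

-- one iteration of A's outer loop body (the contribution added to total_count for this n)
def combRowA (bound n : Int) : Int :=
  let current := pyComb n (PySem.Int.floordiv n 2)
  if current > bound then
    let ncount := (combInnerA n bound current 1 (PySem.Int.floordiv n 2).toNat).2 * 2
    if PySem.Int.mod n 2 = 0 then ncount - 1 else ncount
  else 0

def combinatorics_greater_v2 (N : Int) (bound : Int) : Int :=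
  (PySem.List.pyRange 1 (N + 1) 1).foldl (fun acc n => acc + combRowA bound n) 0

-- ===== PORT B =====
-- the `while lo < hi` binary-search loop of Source B
def combSearchB (n bound lo hi : Int) : Int :=
  if h : lo < hi then
    let mid := PySem.Int.floordiv (lo + hi) 2
    if pyComb n mid > bound then combSearchB n bound lo mid
    else combSearchB n bound (mid + 1) hi
  else lo
termination_by (hi - lo).toNat
decreasing_by
  · have h2 := (PySem.Int.floordiv_lt_iff_lt_mul (a := lo + hi) (b := 2) (q := hi) (by omega)).2 (by omega)
    omega
  · have h1 := PySem.Int.floordiv_two_mid_bounds (le_of_lt h)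
    omega

-- one iteration of B's outer loop body
def combRowB (bound n : Int) : Int :=
  if pyComb n (PySem.Int.floordiv n 2) ≤ bound then 0
  else n + 1 - 2 * combSearchB n bound 0 (PySem.Int.floordiv n 2)

def combinatorics_greater_v2_alt (N : Int) (bound : Int) : Int :=
  (PySem.List.pyRange 1 (N + 1) 1).foldl (fun acc n => acc + combRowB bound n) 0

-- ===== PRECONDITION & SPEC =====
def Spec_combinatorics_greater_v2 (N : Int) (bound : Int) (out : Int) : Prop := out = combinatorics_greater_v2_alt N bound
instance (N : Int) (bound : Int) (out : Int) : Decidable (Spec_combinatorics_greater_v2 N bound out) := by unfold Spec_combinatorics_greater_v2; infer_instance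

-- ===== CLAIM (what is proved, stated in full; the proofs are below) =====
def Claim_equal_combinatorics_greater_v2 : Prop := ∀ (N : Int) (bound : Int), Dom_combinatorics_greater_v2 N bound → Spec_combinatorics_greater_v2 N bound (combinatorics_greater_v2 N bound)

-- ===== LEMMAS AND PROOFS =====

-- comb(n, ·) is nondecreasing on [0, n/2]
theorem choose_mono_half {n r s : ℕ} (hrs : r ≤ s) (hs : s ≤ n / 2) :
    n.choose r ≤ n.choose s := by
  induction s with
  | zero =>
    have : r = 0 := by omega
    simp [this]
  | succ k ih =>
    rcases Nat.lt_or_ge r (k + 1) with h | h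
    · exact (ih (by omega) (by omega)).trans
        (Nat.choose_le_succ_of_lt_half_left (by omega))
    · have : r = k + 1 := by omega
      simp [this]

-- A's inner loop counts the r's above the threshold rmin
theorem combInnerA_cnt (n : ℕ) (bound : Int) (rmin : ℕ)
    (hmin : ∀ t < rmin, ((n.choose t : Nat) : Int) ≤ bound)
    (hPr : bound < ((n.choose rmin : Nat) : Int)) :
    ∀ r cnt, rmin ≤ r → r ≤ n / 2 →
      (combInnerA (n : Int) bound ((n.choose r : Nat) : Int) cnt r).2
        = cnt + ((r - rmin : ℕ) : Int) := by
  intro r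
  induction r with
  | zero =>
    intro cnt hr _
    have h0 : rmin = 0 := by omega
    simp [combInnerA, h0]
  | succ rr ih =>
    intro cnt hr hle
    have hrn : rr + 1 ≤ n := le_trans hle (Nat.div_le_self n 2)
    have hcast : (n : Int) - ((rr + 1 : ℕ) : Int) + 1 = ((n - rr : ℕ) : Int) := by
      push_cast [Nat.cast_sub (by omega : rr ≤ n)]; ring
    have hcur : PySem.Int.floordiv (((n.choose (rr + 1) : ℕ) : Int) * ((rr + 1 : ℕ) : Int))
        ((n : Int) - ((rr + 1 : ℕ) : Int) + 1) = ((n.choose rr : ℕ) : Int) := by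
      rw [hcast,
        show ((n.choose (rr + 1) : ℕ) : Int) * ((rr + 1 : ℕ) : Int)
            = ((n.choose (rr + 1) * (rr + 1) : ℕ) : Int) by push_cast; ring,
        Nat.choose_succ_right_eq n rr, PySem.Int.floordiv_natCast,
        Nat.mul_div_cancel _ (by omega : 0 < n - rr)]
    simp only [combInnerA, hcur]
    by_cases hrr : rmin ≤ rr
    · have hmono : (n.choose rmin : ℕ) ≤ n.choose rr := choose_mono_half hrr (by omega)
      have hgt : ¬ ((n.choose rr : ℕ) : Int) ≤ bound := by
        have : bound < ((n.choose rr : ℕ) : Int) := lt_of_lt_of_le hPr (by exact_mod_cast hmono)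
        omega
      rw [if_neg hgt, ih (cnt + 1) hrr (by omega)]
      omega
    · have hr1 : rmin = rr + 1 := by omega
      have hle' : ((n.choose rr : ℕ) : Int) ≤ bound := hmin rr (by omega)
      rw [if_pos hle']
      simp [hr1]

-- B's binary search returns the threshold rmin
theorem combSearchB_eq (n : ℕ) (bound : Int) (rmin : ℕ)
    (hmin : ∀ t < rmin, ((n.choose t : Nat) : Int) ≤ bound)
    (hPr : bound < ((n.choose rmin : Nat) : Int)) :
    ∀ k : ℕ, ∀ lo hi : Int, (hi - lo).toNat ≤ k →
      0 ≤ lo → lo ≤ (rmin : Int) → (rmin : Int) ≤ hi → hi ≤ ((n / 2 : ℕ) : Int) →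
      combSearchB (n : Int) bound lo hi = (rmin : Int) := by
  intro k
  induction k with
  | zero =>
    intro lo hi hk h0 hlo hhi hm
    rw [combSearchB]
    have hnl : ¬ lo < hi := by omega
    rw [dif_neg hnl]
    omega
  | succ k ih =>
    intro lo hi hk h0 hlo hhi hm
    rw [combSearchB]
    by_cases hlh : lo < hi
    · rw [dif_pos hlh]
      have hb := PySem.Int.floordiv_two_mid_bounds (le_of_lt hlh)
      have hlt : PySem.Int.floordiv (lo + hi) 2 < hi :=
        (PySem.Int.floordiv_lt_iff_lt_mul (by omega)).2 (by omega)
      set mid := PySem.Int.floordiv (lo + hi) 2 with hmiddef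
      have hpc : pyComb (n : Int) mid = ((n.choose mid.toNat : ℕ) : Int) := by
        simp [pyComb]
      by_cases hc : pyComb (n : Int) mid > bound
      · have hge : (rmin : Int) ≤ mid := by
          by_contra hno
          have h1 := hmin mid.toNat (by omega)
          rw [hpc] at hc
          omega
        rw [if_pos hc]
        exact ih lo mid (by omega) h0 hlo hge (by omega)
      · have hltr : mid < (rmin : Int) := by
          by_contra hno
          have h2 : (n.choose rmin : ℕ) ≤ n.choose mid.toNat :=
            choose_mono_half (by omega) (by omega)
          have h3 : bound < ((n.choose mid.toNat : ℕ) : Int) :=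
            lt_of_lt_of_le hPr (by exact_mod_cast h2)
          rw [hpc] at hc
          omega
        rw [if_neg hc]
        exact ih (mid + 1) hi (by omega) (by omega) (by omega) hhi hm
    · rw [dif_neg hlh]
      omega

theorem row_eq (bound n : Int) (hn : 1 ≤ n) : combRowA bound n = combRowB bound n := by
  lift n to ℕ using (by omega) with n'
  rw [combRowA, combRowB]
  have hfd : PySem.Int.floordiv (n' : Int) 2 = ((n' / 2 : ℕ) : Int) := by
    exact_mod_cast PySem.Int.floordiv_natCast n' 2
  have hmod : PySem.Int.mod (n' : Int) 2 = ((n' % 2 : ℕ) : Int) := by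
    exact_mod_cast PySem.Int.mod_natCast n' 2
  have hpc : pyComb (n' : Int) ((n' / 2 : ℕ) : Int) = ((n'.choose (n' / 2) : ℕ) : Int) := by
    simp only [pyComb, Int.toNat_natCast]
  simp only [hfd, hmod, hpc, Int.toNat_natCast]
  by_cases hg : ((n'.choose (n' / 2) : ℕ) : Int) > bound
  · have hex : ∃ r, bound < ((n'.choose r : ℕ) : Int) := ⟨n' / 2, hg⟩
    obtain ⟨rmin, hPr, hmin, hrm⟩ :
        ∃ rmin, bound < ((n'.choose rmin : ℕ) : Int) ∧
          (∀ t < rmin, ((n'.choose t : ℕ) : Int) ≤ bound) ∧ rmin ≤ n' / 2 :=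
      ⟨Nat.find hex, Nat.find_spec hex,
        fun t ht => le_of_not_gt (Nat.find_min hex ht), Nat.find_min' hex hg⟩
    have hA := combInnerA_cnt n' bound rmin hmin hPr (n' / 2) 1 hrm (le_refl _)
    have hB := combSearchB_eq n' bound rmin hmin hPr
      (((n' / 2 : ℕ) : Int) - 0).toNat 0 ((n' / 2 : ℕ) : Int) (le_refl _)
      (le_refl _) (by exact_mod_cast Nat.zero_le _) (by exact_mod_cast hrm) (le_refl _)
    have hnle : ¬ ((n'.choose (n' / 2) : ℕ) : Int) ≤ bound := not_le.mpr hg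
    rw [if_pos hg, if_neg hnle, hA, hB]
    have hsub : ((n' / 2 - rmin : ℕ) : Int) = ((n' / 2 : ℕ) : Int) - (rmin : Int) :=
      Nat.cast_sub hrm
    split_ifs with hpar <;> rw [hsub] <;> omega
  · rw [if_neg hg, if_pos (by omega)]

-- ===== VERDICT (by name: the statement is the Claim_ definition above) =====
theorem combinatorics_greater_v2_spec : Claim_equal_combinatorics_greater_v2 := by
  intro N bound _
  unfold Spec_combinatorics_greater_v2 combinatorics_greater_v2 combinatorics_greater_v2_alt
  apply PySem.List.foldl_congr_mem
  intro acc x hx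
  have hx1 : 1 ≤ x := ((PySem.List.mem_pyRange_one).1 hx).1
  rw [row_eq bound x hx1]
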